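-- pv_equiv track=rewrite | github.com/qwevjlnk/-backend-Python | копия_блокнота__практика_0_5_0_ipynb_.py | get_occupation
-- ===== SOURCE A (Python) =====
-- def get_occupation(people):
--     occupation_dict = {}
--     for name, info in people.items():
--         occupation = info['occupation']
--         if occupation in occupation_dict:
--             occupation_dict[occupation].append(name)
--         else:
--             occupation_dict[occupation] = [name]
--     return occupation_dict
-- ===== SOURCE B (Python) =====
-- def get_occupation(people):
--     # Alternative decomposition: first collect the distinct occupations in
--     # order of first appearance, then build each group by filtering.
--     items = list(people.items())
--     occupations = []
--     for _, info in items: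
--         occ = info['occupation']
--         if occ not in occupations:
--             occupations.append(occ)
--     return {occ: [name for name, info in items if info['occupation'] == occ]
--             for occ in occupations}
-- ===== Notes on version B (the rewrite author's own statement) =====
-- stated objective: alternative
-- what changed: A builds the groups in one pass with per-key appends into a dict; B first computes the ordered list of distinct occupations and then builds each group by a filtering comprehension over the items (two-phase dedup-then-filter instead of incremental dict mutation).
import Mathlib
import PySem

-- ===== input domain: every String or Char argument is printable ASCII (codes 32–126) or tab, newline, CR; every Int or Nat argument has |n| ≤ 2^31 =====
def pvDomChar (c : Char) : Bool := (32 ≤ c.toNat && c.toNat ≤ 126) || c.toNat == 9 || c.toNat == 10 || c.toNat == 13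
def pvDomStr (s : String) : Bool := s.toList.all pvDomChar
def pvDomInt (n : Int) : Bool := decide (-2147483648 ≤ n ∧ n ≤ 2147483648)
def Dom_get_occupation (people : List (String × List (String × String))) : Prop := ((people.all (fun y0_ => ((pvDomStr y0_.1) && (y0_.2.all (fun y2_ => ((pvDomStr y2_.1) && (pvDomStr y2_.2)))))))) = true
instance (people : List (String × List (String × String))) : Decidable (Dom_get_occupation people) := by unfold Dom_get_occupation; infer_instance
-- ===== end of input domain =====

-- B replaces A's one-pass dict mutation by dedup-then-filter (same output); honest line: alternative decomposition, not faster.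

-- ===== PORT A =====
-- info['occupation'] is ported totally via getD (the default "" is only reachable outside Pre_).
def get_occupation (people : List (String × List (String × String))) : List (String × List String) :=
  (people.foldl (fun (d : PySem.Dict String (List String)) p =>
      let occupation := (PySem.Dict.mk p.2).getD "occupation" ""
      if d.contains occupation then
        d.insert occupation (d.getD occupation [] ++ [p.1])
      else
        d.insert occupation [p.1])
    PySem.Dict.empty).items

-- ===== PORT B =====
def get_occupation_alt (people : List (String × List (String × String))) : List (String × List String) :=
  let occupations := people.foldl (fun (acc : List String) p =>
      let occ := (PySem.Dict.mk p.2).getD "occupation" ""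
      if acc.contains occ then acc else acc ++ [occ]) []
  occupations.map (fun occ =>
    (occ, (people.filter (fun p => (PySem.Dict.mk p.2).getD "occupation" "" == occ)).map Prod.fst))

-- ===== PRECONDITION & SPEC =====
-- Pre_ excludes exactly the inputs where some person's info dict lacks the
-- 'occupation' key, on which the Python A raises KeyError.
def Pre_get_occupation (people : List (String × List (String × String))) : Prop :=
  ∀ p ∈ people, (PySem.Dict.mk p.2).contains "occupation" = true
instance (people : List (String × List (String × String))) : Decidable (Pre_get_occupation people) := by unfold Pre_get_occupation; infer_instance

def pvWitness_get_occupation : (List (String × List (String × String))) :=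
  [("alice", [("occupation", "dev")]), ("bob", [("occupation", "chef")]), ("carol", [("occupation", "dev")])]

def Spec_get_occupation (people : List (String × List (String × String))) (out : List (String × List String)) : Prop := out = get_occupation_alt people
instance (people : List (String × List (String × String))) (out : List (String × List String)) : Decidable (Spec_get_occupation people out) := by unfold Spec_get_occupation; infer_instance

-- ===== CLAIM (what is proved, stated in full; the proofs are below) =====
def Claim_equal_get_occupation : Prop := ∀ (people : List (String × List (String × String))), Dom_get_occupation people → Pre_get_occupation people → Spec_get_occupation people (get_occupation people)

-- ===== LEMMAS AND PROOFS =====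

-- the occupation key of one entry
def pvKey (p : String × List (String × String)) : String :=
  (PySem.Dict.mk p.2).getD "occupation" ""

-- A's loop body is exactly Dict.modify at the key, with dflt [] and appending the name
lemma stepA_eq_modify (d : PySem.Dict String (List String)) (p : String × List (String × String)) :
    (if d.contains (pvKey p) then
        d.insert (pvKey p) (d.getD (pvKey p) [] ++ [p.1])
      else
        d.insert (pvKey p) [p.1])
    = d.modify (pvKey p) [] (· ++ [p.1]) := by
  by_cases h : d.contains (pvKey p) = true
  · simp [h, PySem.Dict.modify, PySem.Dict.getD_eq_get?_getD]
  · simp only [Bool.not_eq_true] at h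
    rw [PySem.Dict.getD_of_not_contains d [] h]
    simp [h, PySem.Dict.modify, PySem.Dict.getD_of_not_contains d [] h]

lemma foldA_eq (people : List (String × List (String × String))) :
    get_occupation people =
      ((people.map (fun p => (pvKey p, p.1))).foldl
        (fun (d : PySem.Dict String (List String)) q => d.modify q.1 [] (· ++ [q.2]))
        PySem.Dict.empty).items := by
  unfold get_occupation
  rw [List.foldl_map]
  congr 1
  apply PySem.List.foldl_congr_mem  -- pointwise equality of the step functions
  intro d p _
  exact stepA_eq_modify d p

theorem get_occupation_spec_aux (people : List (String × List (String × String))) :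
    get_occupation people = get_occupation_alt people := by
  have hkeys :
      ((people.map (fun p => (pvKey p, p.1))).foldl
        (fun (d : PySem.Dict String (List String)) q => d.modify q.1 [] (· ++ [q.2]))
        PySem.Dict.empty).keys
      = PySem.Set.ofList (people.map pvKey) := by
    rw [PySem.Dict.keys_foldl_modify_key (key := Prod.fst)]
    simp [List.map_map, PySem.Set.update_nil_left]
    rfl
  have hnodup :
      ((people.map (fun p => (pvKey p, p.1))).foldl
        (fun (d : PySem.Dict String (List String)) q => d.modify q.1 [] (· ++ [q.2]))
        PySem.Dict.empty).keys.Nodup := by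
    rw [hkeys]; exact PySem.Set.nodup_ofList _
  rw [foldA_eq]
  rw [PySem.Dict.items_eq_map_keys _ hnodup []]
  rw [hkeys]
  unfold get_occupation_alt
  have hoccs :
      people.foldl (fun (acc : List String) p =>
        let occ := (PySem.Dict.mk p.2).getD "occupation" ""
        if acc.contains occ then acc else acc ++ [occ]) []
      = PySem.Set.ofList (people.map pvKey) := by
    have : people.foldl (fun (acc : List String) p =>
        let occ := (PySem.Dict.mk p.2).getD "occupation" ""
        if acc.contains occ then acc else acc ++ [occ]) []
        = people.foldl (fun (acc : PySem.Set String) p => PySem.Set.add acc (pvKey p)) [] := rfl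
    rw [this, ← PySem.Set.update_map_eq_foldl_add, PySem.Set.update_nil_left]
  rw [hoccs]
  apply List.map_congr_left
  intro c _
  congr 1
  rw [PySem.Dict.getD_foldl_modify_append]
  simp [List.map_map, Function.comp_def, pvKey, PySem.Dict.getD_empty, List.filter_map]

-- ===== VERDICT (by name: the statement is the Claim_ definition above) =====
theorem get_occupation_spec : Claim_equal_get_occupation := by
  intro people _ _
  exact get_occupation_spec_aux people
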